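-- pv_equiv track=rewrite | github.com/dongkam5/python_prac | prac373.py | solution
-- ===== SOURCE A (Python) =====
-- def solution(id_list, report, k):
--     answer = []
--     ban = {}
--     mail = {}
--     for id in id_list:
--         ban[id] = ''
--         mail[id] = 0
--     report = list(set(report))
--     for re in report:
--         a, b = re.split()
--         ban[b] += a+' '
--     for id in id_list:
--         l = list(map(str, ban[id].split()))
--         if(len(l) >= k):
--             for name in l:
--                 mail[name] += 1
--     for val in mail:
--         answer.append(mail[val])
--     return answer
-- ===== SOURCE B (Python) =====
-- def solution(id_list, report, k):
--     # one pass: dedupe reports (first occurrence), count distinct reports per target,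
--     # then mail each reporter of a banned target once per deduped report.
--     deduped = list(dict.fromkeys(report))
--     pairs = [r.split() for r in deduped]
--     cnt = {}
--     for a, b in pairs:
--         cnt[b] = cnt.get(b, 0) + 1
--     banned = {b for b in cnt if cnt[b] >= k}
--     mail = {i: 0 for i in id_list}
--     for a, b in pairs:
--         if b in banned:
--             mail[a] += 1
--     return [mail[i] for i in id_list]
-- ===== Notes on version B (the rewrite author's own statement) =====
-- stated objective: idiomatic
-- what changed: Instead of concatenating reporter names into per-user strings and re-splitting them in a nested per-id loop, B dedupes the reports once, counts reports per target with a counter dict, forms the banned set, and tallies mail in one pass over the deduped report pairs.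
-- intended difference: On id_lists containing a duplicated id, A returns one entry per distinct id and counts each banned target's reporters once per duplicate occurrence (e.g. ['u','u'],['u u'],1 gives [2]), while B returns one entry per id_list position with each deduped report counted once ([1,1]), which is the intended per-entry answer. — e.g. on solution(["u", "u"], ["u u"], 1): A returns [2], B returns [1, 1]
import Mathlib
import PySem

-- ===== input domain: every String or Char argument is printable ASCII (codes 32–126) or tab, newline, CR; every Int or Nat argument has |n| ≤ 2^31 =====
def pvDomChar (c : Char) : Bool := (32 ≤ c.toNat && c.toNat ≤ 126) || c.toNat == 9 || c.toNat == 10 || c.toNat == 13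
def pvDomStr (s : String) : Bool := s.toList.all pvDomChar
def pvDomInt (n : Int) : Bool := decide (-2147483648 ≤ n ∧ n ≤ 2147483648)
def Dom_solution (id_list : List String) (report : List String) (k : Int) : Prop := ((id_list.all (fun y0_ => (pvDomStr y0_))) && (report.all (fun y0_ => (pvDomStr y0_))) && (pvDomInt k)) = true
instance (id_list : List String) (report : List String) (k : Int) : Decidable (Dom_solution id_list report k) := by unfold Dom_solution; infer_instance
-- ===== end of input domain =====

-- B replaces A's per-user reporter-string concatenation + nested re-split loop by a
-- dedup/count/banned-set pipeline with one tallying pass over the deduped reports (idiomatic; same cost).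
-- On id_lists with a duplicated id the two differ by design (see D_solution below).

-- ===== PORT A =====
-- dict values that Python holds as str are represented as their char lists (PySem.Chars is exact there)

-- ban[b] += a+' '  (KeyError when b is missing: unreachable under Pre_; the port then leaves ban unchanged);
-- a, b = re.split() (ValueError unless exactly two tokens: unreachable under Pre_; the port then skips)
def pvBanStep (ban : PySem.Dict String (List Char)) (re : String) : PySem.Dict String (List Char) :=
  match PySem.Chars.split₀ re.toList with
  | [a, b] =>
    match PySem.Dict.get? ban (String.mk b) with
    | some v => PySem.Dict.insert ban (String.mk b) (v ++ a ++ [' '])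
    | none => ban
  | _ => ban

-- mail[name] += 1  (KeyError when name is missing: unreachable under Pre_; the port then leaves mail unchanged)
def pvIncStep (mail : PySem.Dict String Int) (name : List Char) : PySem.Dict String Int :=
  match PySem.Dict.get? mail (String.mk name) with
  | some v => PySem.Dict.insert mail (String.mk name) (v + 1)
  | none => mail

def solution (id_list : List String) (report : List String) (k : Int) : List Int :=
  -- for id in id_list: ban[id] = ''; mail[id] = 0
  let init := id_list.foldl
    (fun (p : PySem.Dict String (List Char) × PySem.Dict String Int) id =>
      (PySem.Dict.insert p.1 id [], PySem.Dict.insert p.2 id 0))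
    (PySem.Dict.empty, PySem.Dict.empty)
  -- report = list(set(report)); for re in report: a, b = re.split(); ban[b] += a+' '
  -- (the returned value is independent of set iteration order; the port uses PySem.Set.ofList)
  let ban := (PySem.Set.ofList report).foldl pvBanStep init.1
  -- for id in id_list: l = list(map(str, ban[id].split())); if len(l) >= k: for name in l: mail[name] += 1
  -- (ban[id]: the key is always present — it was initialised for every id — so getD is exact)
  let mail := id_list.foldl
    (fun mail id =>
      let l := PySem.Chars.split₀ (PySem.Dict.getD ban id [])
      if k ≤ (l.length : Int) then l.foldl pvIncStep mail else mail)
    init.2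
  -- for val in mail: answer.append(mail[val])   (keys are always present, so getD is exact)
  (PySem.Dict.keys mail).foldl (fun answer val => answer ++ [PySem.Dict.getD mail val 0]) []

-- ===== PORT B =====
-- mail[a] += 1  (KeyError when a is missing: unreachable under Pre_; the port then leaves mail unchanged);
-- 'for a, b in pairs' unpacking (ValueError unless two tokens: unreachable under Pre_; the port then skips)
def pvMailStepB (banned : PySem.Set String) (mail : PySem.Dict String Int) (p : List (List Char)) :
    PySem.Dict String Int :=
  match p with
  | [a, b] =>
    if PySem.Set.contains banned (String.mk b) then
      match PySem.Dict.get? mail (String.mk a) with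
      | some v => PySem.Dict.insert mail (String.mk a) (v + 1)
      | none => mail
    else mail
  | _ => mail

def pvCntStep (cnt : PySem.Dict String Int) (p : List (List Char)) : PySem.Dict String Int :=
  match p with
  | [_, b] => PySem.Dict.insert cnt (String.mk b) (PySem.Dict.getD cnt (String.mk b) 0 + 1)
  | _ => cnt

def solution_alt (id_list : List String) (report : List String) (k : Int) : List Int :=
  -- deduped = list(dict.fromkeys(report))
  let deduped := PySem.List.dedup report
  -- pairs = [r.split() for r in deduped]
  let pairs := deduped.map (fun r => PySem.Chars.split₀ r.toList)
  -- for a, b in pairs: cnt[b] = cnt.get(b, 0) + 1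
  let cnt := pairs.foldl pvCntStep PySem.Dict.empty
  -- banned = {b for b in cnt if cnt[b] >= k}
  let banned := PySem.Set.ofList
    ((PySem.Dict.keys cnt).filter (fun b => k ≤ PySem.Dict.getD cnt b 0))
  -- mail = {i: 0 for i in id_list}
  let mail0 := id_list.foldl (fun m i => PySem.Dict.insert m i 0) PySem.Dict.empty
  -- for a, b in pairs: if b in banned: mail[a] += 1
  let mail := pairs.foldl (pvMailStepB banned) mail0
  -- return [mail[i] for i in id_list]   (keys always present, so getD is exact)
  id_list.map (fun i => PySem.Dict.getD mail i 0)

-- ===== PRECONDITION & SPEC =====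
-- helpers for Pre_: the two tokens of a report and the number of distinct reports naming a target
def pvTgt (r : String) : List Char := (PySem.Chars.split₀ r.toList).getD 1 []
def pvFst (r : String) : List Char := (PySem.Chars.split₀ r.toList).getD 0 []
def pvCnt (report : List String) (b : List Char) : Nat :=
  (PySem.Set.ofList report).countP (fun r => pvTgt r == b)

-- Pre_ excludes exactly the inputs on which A raises: a report that does not split into exactly two
-- tokens (ValueError on unpacking), a report naming a reported user outside id_list (KeyError on ban[b]),
-- or a reporter outside id_list whose target collects at least k distinct reports (KeyError on mail[name]).
def Pre_solution (id_list : List String) (report : List String) (k : Int) : Prop :=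
  ∀ r ∈ report,
    (PySem.Chars.split₀ r.toList).length = 2 ∧
    String.mk (pvTgt r) ∈ id_list ∧
    (k ≤ (pvCnt report (pvTgt r) : Int) → String.mk (pvFst r) ∈ id_list)
instance (id_list : List String) (report : List String) (k : Int) : Decidable (Pre_solution id_list report k) := by unfold Pre_solution; infer_instance

def pvWitness_solution : List String × List String × Int :=
  (["muzi", "frodo"], ["muzi frodo", "frodo muzi"], 1)

-- On id_lists containing a duplicated id, A returns one entry per distinct id and counts each banned
-- target's reporters once per duplicate occurrence (e.g. ['u','u'],['u u'],1 gives [2]), while B returns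
-- one entry per id_list position with each deduped report counted once ([1,1]), the intended per-entry answer.
def D_solution (id_list : List String) (report : List String) (k : Int) : Prop :=
  ¬ id_list.Nodup
instance (id_list : List String) (report : List String) (k : Int) : Decidable (D_solution id_list report k) := by unfold D_solution; infer_instance

def Spec_solution (id_list : List String) (report : List String) (k : Int) (out : List Int) : Prop := ¬ D_solution id_list report k → out = solution_alt id_list report k
instance (id_list : List String) (report : List String) (k : Int) (out : List Int) : Decidable (Spec_solution id_list report k out) := by unfold Spec_solution; infer_instance

def pvDiffWitness_solution : List String × List String × Int :=
  (["u", "u"], ["u u"], 1)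
def pvDiffWitnessOut_solution : (List Int) × (List Int) := ([2], [1, 1])

-- ===== CLAIM (what is proved, stated in full; the proofs are below) =====
def Claim_unchanged_solution : Prop := ∀ (id_list : List String) (report : List String) (k : Int), Dom_solution id_list report k → Pre_solution id_list report k → Spec_solution id_list report k (solution id_list report k)
def Claim_changed_solution : Prop := Dom_solution (pvDiffWitness_solution.1) (pvDiffWitness_solution.2.1) (pvDiffWitness_solution.2.2) ∧ Pre_solution (pvDiffWitness_solution.1) (pvDiffWitness_solution.2.1) (pvDiffWitness_solution.2.2) ∧ D_solution (pvDiffWitness_solution.1) (pvDiffWitness_solution.2.1) (pvDiffWitness_solution.2.2) ∧ solution (pvDiffWitness_solution.1) (pvDiffWitness_solution.2.1) (pvDiffWitness_solution.2.2) = pvDiffWitnessOut_solution.1 ∧ solution_alt (pvDiffWitness_solution.1) (pvDiffWitness_solution.2.1) (pvDiffWitness_solution.2.2) = pvDiffWitnessOut_solution.2 ∧ pvDiffWitnessOut_solution.1 ≠ pvDiffWitnessOut_solution.2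
def Claim_exact_solution : Prop := ∀ (id_list : List String) (report : List String) (k : Int), Dom_solution id_list report k → Pre_solution id_list report k → D_solution id_list report k → solution id_list report k ≠ solution_alt id_list report k

-- ===== LEMMAS AND PROOFS =====

-- a token produced by str.split() is nonempty and whitespace-free
theorem pv_go_wf (s : List Char) : ∀ (cur : List Char) (acc : List (List Char)),
    (∀ c ∈ cur, PySem.Chars.isspace c = false) →
    (∀ t ∈ acc, t ≠ [] ∧ ∀ c ∈ t, PySem.Chars.isspace c = false) →
    ∀ t ∈ PySem.Chars.split₀.go s cur acc, t ≠ [] ∧ ∀ c ∈ t, PySem.Chars.isspace c = false := by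
  induction s with
  | nil =>
    intro cur acc hcur hacc t ht
    simp only [PySem.Chars.split₀.go] at ht
    by_cases hc : cur.isEmpty
    · rw [if_pos hc] at ht
      exact hacc t (by simpa using ht)
    · rw [if_neg hc] at ht
      rw [List.mem_reverse, List.mem_cons] at ht
      rcases ht with h | h
      · subst h
        refine ⟨by simpa using hc, ?_⟩
        intro c hcmem
        exact hcur c (List.mem_reverse.mp hcmem)
      · exact hacc t h
  | cons c rest ih =>
    intro cur acc hcur hacc t ht
    simp only [PySem.Chars.split₀.go] at ht
    by_cases hs : PySem.Chars.isspace c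
    · rw [if_pos hs] at ht
      by_cases hc : cur.isEmpty
      · rw [if_pos hc] at ht
        exact ih [] acc (by simp) hacc t ht
      · rw [if_neg hc] at ht
        refine ih [] _ (by simp) ?_ t ht
        intro u hu
        rcases List.mem_cons.mp hu with h | h
        · subst h
          refine ⟨by simpa using hc, ?_⟩
          intro c' hc'
          exact hcur c' (List.mem_reverse.mp hc')
        · exact hacc u h
    · rw [if_neg hs] at ht
      refine ih (c :: cur) acc ?_ hacc t ht
      intro u hu
      rcases List.mem_cons.mp hu with h | h
      · subst h; simpa using hs
      · exact hcur u h

theorem pv_wf_of_mem_split₀ (s : List Char) :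
    ∀ t ∈ PySem.Chars.split₀ s, t ≠ [] ∧ ∀ c ∈ t, PySem.Chars.isspace c = false := by
  exact pv_go_wf s [] [] (by simp) (by simp)

theorem pv_go_token (t : List Char) : (∀ c ∈ t, PySem.Chars.isspace c = false) →
    ∀ rest cur acc, PySem.Chars.split₀.go (t ++ rest) cur acc
      = PySem.Chars.split₀.go rest (t.reverse ++ cur) acc := by
  induction t with
  | nil => intro _ rest cur acc; simp
  | cons c t' ih =>
    intro ht rest cur acc
    have hc : PySem.Chars.isspace c = false := ht c (by simp)
    have ht' : ∀ c' ∈ t', PySem.Chars.isspace c' = false := fun c' h => ht c' (by simp [h])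
    simp only [List.cons_append, PySem.Chars.split₀.go, hc, Bool.false_eq_true,
      ite_false]
    rw [ih ht' rest (c :: cur) acc]
    simp [List.append_assoc]

theorem pv_go_flatten (ts : List (List Char)) :
    (∀ t ∈ ts, t ≠ [] ∧ ∀ c ∈ t, PySem.Chars.isspace c = false) →
    ∀ acc, PySem.Chars.split₀.go ((ts.map (· ++ [' '])).flatten) [] acc = acc.reverse ++ ts := by
  induction ts with
  | nil => intro _ acc; simp [PySem.Chars.split₀.go]
  | cons t ts' ih =>
    intro h acc
    have hwf := h t (by simp)
    have hne : t.reverse ++ [] ≠ [] := by simpa using hwf.1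
    rw [List.map_cons, List.flatten_cons, List.append_assoc,
      pv_go_token t hwf.2 ([' '] ++ (ts'.map (· ++ [' '])).flatten) [] acc]
    simp only [List.singleton_append, PySem.Chars.split₀.go]
    rw [if_pos (by decide : PySem.Chars.isspace ' ' = true)]
    rw [if_neg (by simpa using hne)]
    simp only [List.append_nil, List.reverse_reverse]
    rw [ih (fun u hu => h u (by simp [hu])) (t :: acc)]
    simp

theorem pv_split_flatten (ts : List (List Char)) :
    (∀ t ∈ ts, t ≠ [] ∧ ∀ c ∈ t, PySem.Chars.isspace c = false) →
    PySem.Chars.split₀ ((ts.map (· ++ [' '])).flatten) = ts := by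
  intro h
  show PySem.Chars.split₀.go _ [] [] = ts
  rw [pv_go_flatten ts h []]
  simp

-- A's ban-building fold
theorem pv_toList_mk (l : List Char) : (String.mk l).toList = l := by
  exact Eq.symm (String.ofList_eq.mp rfl)

theorem pv_mk_eq_iff (l : List Char) (s : String) : String.mk l = s ↔ l = s.toList := by
  constructor
  · intro h; rw [← h, pv_toList_mk]
  · intro h; subst h; exact String.toList_inj.mp (pv_toList_mk _)

theorem pv_get?_of_contains {ν : Type} (d : PySem.Dict String ν) (x : String) (d0 : ν)
    (h : PySem.Dict.contains d x = true) :
    PySem.Dict.get? d x = some (PySem.Dict.getD d x d0) := by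
  have hs : (PySem.Dict.get? d x).isSome := by
    rw [← PySem.Dict.contains_eq_isSome_get?]; exact h
  obtain ⟨v, hv⟩ := Option.isSome_iff_exists.mp hs
  rw [hv, PySem.Dict.getD_of_get?_eq_some _ _ hv]

theorem pv_getD_banFold (rs : List String) : ∀ (d : PySem.Dict String (List Char)),
    (∀ r ∈ rs, (PySem.Chars.split₀ r.toList).length = 2 ∧
      PySem.Dict.contains d (String.mk (pvTgt r)) = true) → ∀ (id : String),
    PySem.Dict.getD (rs.foldl pvBanStep d) id []
      = PySem.Dict.getD d id []
        ++ ((rs.filter (fun r => pvTgt r == id.toList)).map (fun r => pvFst r ++ [' '])).flatten := by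
  induction rs with
  | nil => intro d _ id; simp
  | cons r rs ih =>
    intro d h id
    obtain ⟨h2, hcont⟩ := h r (List.mem_cons_self)
    obtain ⟨a, b, hab⟩ := List.length_eq_two.mp h2
    have hb : pvTgt r = b := by simp [pvTgt, hab]
    have ha : pvFst r = a := by simp [pvFst, hab]
    rw [hb] at hcont
    have hget := pv_get?_of_contains d (String.mk b) [] hcont
    have hstep : pvBanStep d r
        = PySem.Dict.insert d (String.mk b) (PySem.Dict.getD d (String.mk b) [] ++ a ++ [' ']) := by
      simp [pvBanStep, hab, hget]
    have hih := ih (PySem.Dict.insert d (String.mk b) (PySem.Dict.getD d (String.mk b) [] ++ a ++ [' ']))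
      (by
        intro r' hr'
        obtain ⟨h2', hcont'⟩ := h r' (by simp [hr'])
        refine ⟨h2', ?_⟩
        rw [PySem.Dict.contains_insert]
        simp [hcont']) id
    rw [List.foldl_cons, hstep, hih, PySem.Dict.getD_insert, List.filter_cons]
    by_cases hid : id = String.mk b
    · -- id was a reported target: its string grows by a ++ ' '
      have hcond : pvTgt r = id.toList := by rw [hb, hid, pv_toList_mk]
      rw [if_pos hid, if_pos (by simp [hcond])]
      simp [ha, hid, List.append_assoc]
    · have hcond : (pvTgt r == id.toList) = false := by
        rw [hb]
        simp only [beq_eq_false_iff_ne, ne_eq]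
        intro he
        exact hid (by rw [(pv_mk_eq_iff b id).mpr he])
      simp [hid, hcond]

-- the pair of initialisation folds splits componentwise
theorem pv_init_eq (id_list : List String)
    (e1 : PySem.Dict String (List Char)) (e2 : PySem.Dict String Int) :
    id_list.foldl
      (fun (p : PySem.Dict String (List Char) × PySem.Dict String Int) id =>
        (PySem.Dict.insert p.1 id [], PySem.Dict.insert p.2 id 0)) (e1, e2)
      = (id_list.foldl (fun d id => PySem.Dict.insert d id []) e1,
         id_list.foldl (fun d id => PySem.Dict.insert d id 0) e2) := by
  induction id_list generalizing e1 e2 with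
  | nil => rfl
  | cons a l ih => simp only [List.foldl_cons]; exact ih _ _

theorem pv_keys_constFold {ν : Type} (v : ν) (ids : List String) :
    PySem.Dict.keys (ids.foldl (fun d id => PySem.Dict.insert d id v) PySem.Dict.empty)
      = PySem.Set.ofList ids := by
  rw [PySem.Dict.keys_foldl_insert (f := fun _ _ => v)]
  simp [PySem.Set.update, PySem.Set.ofList_eq_foldl, PySem.Dict.keys_empty]

theorem pv_contains_constFold {ν : Type} (v : ν) (ids : List String) (x : String) :
    PySem.Dict.contains (ids.foldl (fun d id => PySem.Dict.insert d id v) PySem.Dict.empty) x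
      = decide (x ∈ ids) := by
  rw [PySem.Dict.contains_eq_decide_mem_keys, pv_keys_constFold]
  simp [PySem.Set.mem_ofList]

theorem pv_getD_constFold {ν : Type} (v d0 : ν) (ids : List String) (x : String) :
    PySem.Dict.getD (ids.foldl (fun d id => PySem.Dict.insert d id v) PySem.Dict.empty) x d0
      = if x ∈ ids then v else d0 := by
  have main : ∀ (l : List String) (d : PySem.Dict String ν),
      PySem.Dict.getD (l.foldl (fun d id => PySem.Dict.insert d id v) d) x d0
        = if x ∈ l then v else PySem.Dict.getD d x d0 := by
    intro l
    induction l with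
    | nil => intro d; simp
    | cons a l ih =>
      intro d
      rw [List.foldl_cons, ih]
      by_cases hx : x ∈ l
      · simp [hx]
      · simp only [hx, if_false, List.mem_cons, PySem.Dict.getD_insert]
        by_cases hxa : x = a <;> simp [hxa]
  rw [main]
  by_cases hx : x ∈ ids <;> simp [hx, PySem.Dict.getD_empty]

-- the increment fold (A's inner mail loop)
theorem pv_incFold (l : List (List Char)) : ∀ (m : PySem.Dict String Int),
    (∀ nm ∈ l, PySem.Dict.contains m (String.mk nm) = true) →
    PySem.Dict.keys (l.foldl pvIncStep m) = PySem.Dict.keys m ∧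
    ∀ x, PySem.Dict.getD (l.foldl pvIncStep m) x 0
      = PySem.Dict.getD m x 0 + (((l.map String.mk).count x : Nat) : Int) := by
  induction l with
  | nil => intro m _; simp
  | cons nm l ih =>
    intro m h
    have hcont := h nm (List.mem_cons_self)
    have hget := pv_get?_of_contains m (String.mk nm) 0 hcont
    have hstep : pvIncStep m nm
        = PySem.Dict.insert m (String.mk nm) (PySem.Dict.getD m (String.mk nm) 0 + 1) := by
      simp [pvIncStep, hget]
    obtain ⟨ihk, ihg⟩ := ih (PySem.Dict.insert m (String.mk nm) (PySem.Dict.getD m (String.mk nm) 0 + 1))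
      (by
        intro u hu
        rw [PySem.Dict.contains_insert]
        simp [h u (by simp [hu])])
    rw [List.foldl_cons, hstep]
    refine ⟨by rw [ihk, PySem.Dict.keys_insert_of_contains m _ hcont], ?_⟩
    intro x
    rw [ihg x, PySem.Dict.getD_insert, List.map_cons, List.count_cons]
    by_cases hx : x = String.mk nm
    · simp only [hx, if_pos rfl, beq_self_eq_true, if_pos]
      push_cast
      omega
    · have hbx : (String.mk nm == x) = false := by simp [beq_eq_false_iff_ne]; exact fun e => hx e.symm
      simp only [hx, if_neg, hbx, Bool.false_eq_true, ite_false, if_false]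
      omega

-- A's outer mail fold, for an arbitrary per-id token-list function L
theorem pv_mailFoldA (k : Int) (L : String → List (List Char)) (ids : List String) :
    ∀ (m : PySem.Dict String Int),
    (∀ id ∈ ids, k ≤ ((L id).length : Int) → ∀ nm ∈ L id,
      PySem.Dict.contains m (String.mk nm) = true) →
    PySem.Dict.keys (ids.foldl (fun m id =>
        if k ≤ ((L id).length : Int) then (L id).foldl pvIncStep m else m) m)
      = PySem.Dict.keys m ∧
    ∀ x, PySem.Dict.getD (ids.foldl (fun m id =>
        if k ≤ ((L id).length : Int) then (L id).foldl pvIncStep m else m) m) x 0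
      = PySem.Dict.getD m x 0
        + ((ids.map (fun id => if k ≤ ((L id).length : Int)
            then (((L id).map String.mk).count x : Int) else 0)).sum) := by
  induction ids with
  | nil => intro m _; simp
  | cons id ids ih =>
    intro m h
    simp only [List.foldl_cons, List.map_cons, List.sum_cons]
    by_cases hk : k ≤ ((L id).length : Int)
    · obtain ⟨hk1, hg1⟩ := pv_incFold (L id) m (h id (by simp) hk)
      rw [if_pos hk]
      obtain ⟨ihk, ihg⟩ := ih ((L id).foldl pvIncStep m)
        (by
          intro id' hid' hk' nm hnm
          rw [PySem.Dict.contains_eq_decide_mem_keys, hk1,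
            ← PySem.Dict.contains_eq_decide_mem_keys]
          exact h id' (by simp [hid']) hk' nm hnm)
      refine ⟨by rw [ihk, hk1], ?_⟩
      intro x
      rw [ihg x, hg1 x, if_pos hk]
      omega
    · rw [if_neg hk]
      obtain ⟨ihk, ihg⟩ := ih m (fun id' h' => h id' (by simp [h']))
      refine ⟨ihk, fun x => ?_⟩
      rw [ihg x, if_neg hk]
      omega

-- B's counter fold
theorem pv_cntFold_eq (rs : List String) : ∀ (d : PySem.Dict String Int),
    (∀ r ∈ rs, (PySem.Chars.split₀ r.toList).length = 2) →
    (rs.map (fun r => PySem.Chars.split₀ r.toList)).foldl pvCntStep d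
      = (rs.map (fun r => String.mk (pvTgt r))).foldl
          (fun d x => PySem.Dict.insert d x (PySem.Dict.getD d x 0 + 1)) d := by
  induction rs with
  | nil => intro d _; rfl
  | cons r rs ih =>
    intro d h
    obtain ⟨a, b, hab⟩ := List.length_eq_two.mp (h r (by simp))
    have hb : pvTgt r = b := by simp [pvTgt, hab]
    simp only [List.map_cons, List.foldl_cons]
    rw [ih _ (fun u hu => h u (by simp [hu]))]
    congr 1
    simp [pvCntStep, hab, hb]

theorem pv_cntFold (rs : List String) (h : ∀ r ∈ rs, (PySem.Chars.split₀ r.toList).length = 2)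
    (x : String) :
    PySem.Dict.getD ((rs.map (fun r => PySem.Chars.split₀ r.toList)).foldl pvCntStep PySem.Dict.empty) x 0
      = (((rs.map (fun r => String.mk (pvTgt r))).count x : Nat) : Int) := by
  rw [pv_cntFold_eq rs _ h, PySem.Dict.getD_foldl_insert_add_one]
  simp

theorem pv_keys_cntFold (rs : List String) (h : ∀ r ∈ rs, (PySem.Chars.split₀ r.toList).length = 2) :
    PySem.Dict.keys ((rs.map (fun r => PySem.Chars.split₀ r.toList)).foldl pvCntStep PySem.Dict.empty)
      = PySem.Set.ofList (rs.map (fun r => String.mk (pvTgt r))) := by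
  rw [pv_cntFold_eq rs _ h,
    PySem.Dict.keys_foldl_insert (f := fun d x => PySem.Dict.getD d x 0 + 1)]
  simp [PySem.Set.update, PySem.Set.ofList_eq_foldl, PySem.Dict.keys_empty]

-- B's mail fold
theorem pv_mailFoldB (banned : PySem.Set String) (rs : List String) :
    ∀ (m : PySem.Dict String Int),
    (∀ r ∈ rs, (PySem.Chars.split₀ r.toList).length = 2) →
    (∀ r ∈ rs, PySem.Set.contains banned (String.mk (pvTgt r)) = true →
      PySem.Dict.contains m (String.mk (pvFst r)) = true) →
    PySem.Dict.keys ((rs.map (fun r => PySem.Chars.split₀ r.toList)).foldl (pvMailStepB banned) m)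
      = PySem.Dict.keys m ∧
    ∀ x, PySem.Dict.getD
        ((rs.map (fun r => PySem.Chars.split₀ r.toList)).foldl (pvMailStepB banned) m) x 0
      = PySem.Dict.getD m x 0
        + ((rs.countP (fun r => PySem.Set.contains banned (String.mk (pvTgt r))
            && (String.mk (pvFst r) == x)) : Nat) : Int) := by
  induction rs with
  | nil => intro m _ _; simp
  | cons r rs ih =>
    intro m h2 h
    obtain ⟨a, b, hab⟩ := List.length_eq_two.mp (h2 r (by simp))
    have hb : pvTgt r = b := by simp [pvTgt, hab]
    have ha : pvFst r = a := by simp [pvFst, hab]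
    simp only [List.map_cons, List.foldl_cons, List.countP_cons]
    by_cases hban : PySem.Set.contains banned (String.mk (pvTgt r)) = true
    · have hcont : PySem.Dict.contains m (String.mk a) = true := by
        rw [← ha]; exact h r (by simp) hban
      have hget := pv_get?_of_contains m (String.mk a) 0 hcont
      have hban' : PySem.Set.contains banned (String.mk b) = true := by rw [← hb]; exact hban
      have hstep : pvMailStepB banned m (PySem.Chars.split₀ r.toList)
          = PySem.Dict.insert m (String.mk a) (PySem.Dict.getD m (String.mk a) 0 + 1) := by
        simp only [pvMailStepB, hab]
        rw [hban', hget]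
        simp
      rw [hstep]
      obtain ⟨ihk, ihg⟩ := ih (PySem.Dict.insert m (String.mk a) (PySem.Dict.getD m (String.mk a) 0 + 1))
        (fun u hu => h2 u (by simp [hu]))
        (by
          intro u hu hbu
          rw [PySem.Dict.contains_insert]
          simp [h u (by simp [hu]) hbu])
      refine ⟨by rw [ihk, PySem.Dict.keys_insert_of_contains m _ hcont], ?_⟩
      intro x
      rw [ihg x, PySem.Dict.getD_insert]
      by_cases hx : x = String.mk a
      · simp only [hban, ha, hx, beq_self_eq_true, Bool.and_true, Bool.true_and, if_pos rfl]
        push_cast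
        omega
      · have hbx : (String.mk a == x) = false := by
          simp only [beq_eq_false_iff_ne, ne_eq]; exact fun e => hx e.symm
        simp only [hban, ha, hbx, Bool.and_false, Bool.true_and, if_neg hx]
        push_cast
        omega
    · have hbanf : PySem.Set.contains banned (String.mk b) = false := by
        rw [← hb]; simpa using hban
      have hstep : pvMailStepB banned m (PySem.Chars.split₀ r.toList) = m := by
        simp only [pvMailStepB, hab]
        rw [hbanf]
        simp
      rw [hstep]
      obtain ⟨ihk, ihg⟩ := ih m (fun u hu => h2 u (by simp [hu])) (fun u hu => h u (by simp [hu]))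
      refine ⟨ihk, fun x => ?_⟩
      rw [ihg x]
      have hfalse : (PySem.Set.contains banned (String.mk (pvTgt r)) && (String.mk (pvFst r) == x)) = false := by
        rw [hb, hbanf]; simp
      rw [hfalse]
      norm_num

-- counting helpers
theorem pv_countP_split {α : Type} (p q : α → Bool) (l : List α) :
    l.countP q = l.countP (fun a => p a && q a) + l.countP (fun a => !p a && q a) := by
  induction l with
  | nil => simp
  | cons a l ih =>
    simp only [List.countP_cons, ih]
    cases hp : p a <;> cases hq : q a <;> simp <;> omega

theorem pv_regroup (ids : List String) : ∀ (rs : List String) (G : String → Bool),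
    ids.Nodup → (∀ r ∈ rs, G r = true → String.mk (pvTgt r) ∈ ids) →
    ((ids.map (fun id => ((rs.countP (fun r => (pvTgt r == id.toList) && G r) : Nat) : Int))).sum)
      = ((rs.countP G : Nat) : Int) := by
  induction ids with
  | nil =>
    intro rs G _ hmem
    have : rs.countP G = 0 := by
      rw [List.countP_eq_zero]
      intro r hr hG
      exact absurd (hmem r hr hG) (List.not_mem_nil)
    simp [this]
  | cons id ids ih =>
    intro rs G hnd hmem
    have hidnot : id ∉ ids := (List.nodup_cons.mp hnd).1
    have hndtail : ids.Nodup := (List.nodup_cons.mp hnd).2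
    have hterm : ∀ id' ∈ ids, rs.countP (fun r => (pvTgt r == id'.toList) && G r)
        = (rs.filter (fun r => !(pvTgt r == id.toList))).countP
            (fun r => (pvTgt r == id'.toList) && G r) := by
      intro id' hid'
      rw [List.countP_filter]
      apply List.countP_congr
      intro r _
      by_cases ht : pvTgt r = id'.toList
      · have hne : id' ≠ id := fun e => hidnot (e ▸ hid')
        have h3 : (id'.toList == id.toList) = false := by
          simp only [beq_eq_false_iff_ne, ne_eq]
          intro e
          exact hne (String.toList_inj.mp e)
        simp [ht, h3]
      · simp [ht]
    have hmap : ids.map (fun id' => ((rs.countP (fun r => (pvTgt r == id'.toList) && G r) : Nat) : Int))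
        = ids.map (fun id' => (((rs.filter (fun r => !(pvTgt r == id.toList))).countP
            (fun r => (pvTgt r == id'.toList) && G r) : Nat) : Int)) := by
      apply List.map_congr_left
      intro id' hid'
      rw [hterm id' hid']
    rw [List.map_cons, List.sum_cons, hmap,
      ih (rs.filter (fun r => !(pvTgt r == id.toList))) G hndtail
        (by
          intro r hr hG
          obtain ⟨hrm, hnotb⟩ := List.mem_filter.mp hr
          rcases List.mem_cons.mp (hmem r hrm hG) with he | hmem'
          · exfalso
            have : pvTgt r = id.toList := by rw [← he, pv_toList_mk]
            simp [this] at hnotb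
          · exact hmem')]
    rw [List.countP_filter]
    have hsplit := pv_countP_split (fun r => pvTgt r == id.toList) G rs
    have hcomm : rs.countP (fun a => G a && !(pvTgt a == id.toList))
        = rs.countP (fun a => !(pvTgt a == id.toList) && G a) := by
      apply List.countP_congr
      intro r _
      cases G r <;> cases (pvTgt r == id.toList) <;> simp
    rw [hcomm]
    push_cast
    omega

-- counting bridges
theorem pv_count_map_mk (D : List String) (t : List Char) :
    (D.map (fun r => String.mk (pvTgt r))).count (String.mk t)
      = D.countP (fun r => pvTgt r == t) := by
  rw [List.count_eq_countP, List.countP_map]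
  apply List.countP_congr
  intro r _
  simp [Function.comp, pv_mk_eq_iff, pv_toList_mk]

theorem pv_countA (D : List String) (id x : String) :
    (((D.filter (fun r => pvTgt r == id.toList)).map pvFst).map String.mk).count x
      = D.countP (fun r => (pvTgt r == id.toList) && (String.mk (pvFst r) == x)) := by
  induction D with
  | nil => simp
  | cons r D ih =>
    rw [List.filter_cons, List.countP_cons]
    by_cases hp : (pvTgt r == id.toList) = true
    · rw [if_pos hp]
      simp only [List.map_cons, List.count_cons, ih, hp, Bool.true_and]
    · have hp' : (pvTgt r == id.toList) = false := by simpa using hp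
      rw [if_neg (by simp [hp']), ih]
      simp [hp']

-- the banned set of B tests exactly 'k distinct reports name this target'
theorem pv_banned_eq (report : List String) (k : Int)
    (hrep2 : ∀ r ∈ PySem.Set.ofList report, (PySem.Chars.split₀ r.toList).length = 2) :
    ∀ r ∈ PySem.Set.ofList report,
      PySem.Set.contains (PySem.Set.ofList
          ((PySem.Dict.keys (((PySem.Set.ofList report).map (fun r => PySem.Chars.split₀ r.toList)).foldl
              pvCntStep PySem.Dict.empty)).filter
            (fun b => k ≤ PySem.Dict.getD (((PySem.Set.ofList report).map (fun r => PySem.Chars.split₀ r.toList)).foldl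
              pvCntStep PySem.Dict.empty) b 0)))
        (String.mk (pvTgt r))
      = decide (k ≤ (((PySem.Set.ofList report).countP (fun r' => pvTgt r' == pvTgt r) : Nat) : Int)) := by
  intro r hrD
  have hkeysCnt := pv_keys_cntFold (PySem.Set.ofList report) hrep2
  have hmemkeys : String.mk (pvTgt r) ∈ PySem.Dict.keys (((PySem.Set.ofList report).map
      (fun r => PySem.Chars.split₀ r.toList)).foldl pvCntStep PySem.Dict.empty) := by
    rw [hkeysCnt, PySem.Set.mem_ofList]
    exact List.mem_map.mpr ⟨r, hrD, rfl⟩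
  have hgd : PySem.Dict.getD (((PySem.Set.ofList report).map (fun r => PySem.Chars.split₀ r.toList)).foldl
      pvCntStep PySem.Dict.empty) (String.mk (pvTgt r)) 0
      = (((PySem.Set.ofList report).countP (fun r' => pvTgt r' == pvTgt r) : Nat) : Int) := by
    rw [pv_cntFold (PySem.Set.ofList report) hrep2, pv_count_map_mk]
  by_cases hkle : k ≤ (((PySem.Set.ofList report).countP (fun r' => pvTgt r' == pvTgt r) : Nat) : Int)
  · rw [decide_eq_true hkle]
    rw [PySem.Set.contains_iff, PySem.Set.mem_ofList, List.mem_filter]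
    exact ⟨hmemkeys, by rw [hgd]; simpa using hkle⟩
  · rw [decide_eq_false hkle]
    rw [← Bool.not_eq_true, PySem.Set.contains_iff, PySem.Set.mem_ofList, List.mem_filter]
    intro ⟨_, hle⟩
    rw [hgd] at hle
    exact hkle (by simpa using hle)

-- A evaluated: one entry per DISTINCT id (mail's keys), no Nodup assumption needed
theorem pv_A_eq (id_list report : List String) (k : Int)
    (hpre : Pre_solution id_list report k) :
    solution id_list report k
      = (PySem.Set.ofList id_list).map (fun x => (id_list.map (fun id =>
          if k ≤ (((((PySem.Set.ofList report).filter (fun r => pvTgt r == id.toList)).map pvFst).length : Nat) : Int)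
          then ((((((PySem.Set.ofList report).filter (fun r => pvTgt r == id.toList)).map pvFst).map String.mk).count x : Nat) : Int)
          else 0)).sum) := by
  have hDmem : ∀ r ∈ PySem.Set.ofList report, r ∈ report :=
    fun r h => (PySem.Set.mem_ofList report r).mp h
  have hrep2 : ∀ r ∈ PySem.Set.ofList report, (PySem.Chars.split₀ r.toList).length = 2 :=
    fun r h => (hpre r (hDmem r h)).1
  have hrepT : ∀ r ∈ PySem.Set.ofList report, String.mk (pvTgt r) ∈ id_list :=
    fun r h => (hpre r (hDmem r h)).2.1
  have hrepF : ∀ r ∈ PySem.Set.ofList report,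
      k ≤ ((pvCnt report (pvTgt r) : Nat) : Int) → String.mk (pvFst r) ∈ id_list :=
    fun r h => (hpre r (hDmem r h)).2.2
  have hcntD : ∀ b, (pvCnt report b : Nat)
      = (PySem.Set.ofList report).countP (fun r => pvTgt r == b) := fun _ => rfl
  have hlen : ∀ id : String,
      (((PySem.Set.ofList report).filter (fun r => pvTgt r == id.toList)).map pvFst).length
        = (PySem.Set.ofList report).countP (fun r => pvTgt r == id.toList) := by
    intro id; rw [List.length_map, ← List.countP_eq_length_filter]
  have htgt_of_filter : ∀ (id : String) (r : String),
      r ∈ (PySem.Set.ofList report).filter (fun r => pvTgt r == id.toList) → pvTgt r = id.toList := by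
    intro id r hr
    have := (List.mem_filter.mp hr).2
    simpa using this
  have hbanC : ∀ r ∈ PySem.Set.ofList report,
      PySem.Dict.contains (id_list.foldl (fun d id => PySem.Dict.insert d id ([] : List Char)) PySem.Dict.empty)
        (String.mk (pvTgt r)) = true := by
    intro r h
    rw [pv_contains_constFold]
    simp [hrepT r h]
  have hban : ∀ id : String,
      PySem.Dict.getD ((PySem.Set.ofList report).foldl pvBanStep
          (id_list.foldl (fun d id => PySem.Dict.insert d id ([] : List Char)) PySem.Dict.empty)) id []
        = (((PySem.Set.ofList report).filter (fun r => pvTgt r == id.toList)).map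
            (fun r => pvFst r ++ [' '])).flatten := by
    intro id
    rw [pv_getD_banFold (PySem.Set.ofList report) _ (fun r h => ⟨hrep2 r h, hbanC r h⟩) id,
      pv_getD_constFold]
    simp
  have hwfF : ∀ id : String,
      ∀ t ∈ ((PySem.Set.ofList report).filter (fun r => pvTgt r == id.toList)).map pvFst,
        t ≠ [] ∧ ∀ c ∈ t, PySem.Chars.isspace c = false := by
    intro id t ht
    obtain ⟨r, hr, rfl⟩ := List.mem_map.mp ht
    have hrD := (List.mem_filter.mp hr).1
    obtain ⟨a, b, hab⟩ := List.length_eq_two.mp (hrep2 r hrD)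
    have hmem : pvFst r ∈ PySem.Chars.split₀ r.toList := by simp [pvFst, hab]
    exact pv_wf_of_mem_split₀ _ _ hmem
  have hsplitEq : ∀ id : String,
      PySem.Chars.split₀ (PySem.Dict.getD ((PySem.Set.ofList report).foldl pvBanStep
          (id_list.foldl (fun d id => PySem.Dict.insert d id ([] : List Char)) PySem.Dict.empty)) id [])
        = ((PySem.Set.ofList report).filter (fun r => pvTgt r == id.toList)).map pvFst := by
    intro id
    rw [hban id, show ((PySem.Set.ofList report).filter (fun r => pvTgt r == id.toList)).map
          (fun r => pvFst r ++ [' '])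
        = (((PySem.Set.ofList report).filter (fun r => pvTgt r == id.toList)).map pvFst).map
            (fun t => t ++ [' ']) by rw [List.map_map]; simp [Function.comp]]
    exact pv_split_flatten _ (hwfF id)
  have hmailA := pv_mailFoldA k
    (fun id => ((PySem.Set.ofList report).filter (fun r => pvTgt r == id.toList)).map pvFst)
    id_list
    (id_list.foldl (fun d id => PySem.Dict.insert d id (0 : Int)) PySem.Dict.empty)
    (by
      intro id hid hk nm hnm
      obtain ⟨r, hr, rfl⟩ := List.mem_map.mp hnm
      have hrD := (List.mem_filter.mp hr).1
      have htg := htgt_of_filter id r hr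
      rw [pv_contains_constFold]
      have hkc : k ≤ ((pvCnt report (pvTgt r) : Nat) : Int) := by
        rw [hcntD, htg]
        calc k ≤ _ := hk
        _ = _ := by rw [hlen id]
      simp [hrepF r hrD hkc])
  simp only [solution, pv_init_eq]
  rw [show (fun (mail : PySem.Dict String Int) (id : String) =>
        let l := PySem.Chars.split₀ (PySem.Dict.getD ((PySem.Set.ofList report).foldl pvBanStep
          (id_list.foldl (fun d id => PySem.Dict.insert d id ([] : List Char)) PySem.Dict.empty)) id [])
        if k ≤ ((l.length : Nat) : Int) then l.foldl pvIncStep mail else mail)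
      = (fun (mail : PySem.Dict String Int) (id : String) =>
        if k ≤ (((((PySem.Set.ofList report).filter (fun r => pvTgt r == id.toList)).map pvFst).length : Nat) : Int)
        then (((PySem.Set.ofList report).filter (fun r => pvTgt r == id.toList)).map pvFst).foldl pvIncStep mail
        else mail) by
    funext m id
    simp only [hsplitEq id]]
  rw [PySem.List.foldl_append_singleton_eq_map, hmailA.1, pv_keys_constFold]
  simp only [List.nil_append]
  apply List.map_congr_left
  intro x _
  rw [hmailA.2 x, pv_getD_constFold]
  simp

-- B evaluated: one entry per id_list position
theorem pv_B_eq (id_list report : List String) (k : Int)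
    (hpre : Pre_solution id_list report k) :
    solution_alt id_list report k
      = id_list.map (fun x =>
          (((PySem.Set.ofList report).countP (fun r =>
            PySem.Set.contains (PySem.Set.ofList
                ((PySem.Dict.keys (((PySem.Set.ofList report).map (fun r => PySem.Chars.split₀ r.toList)).foldl
                    pvCntStep PySem.Dict.empty)).filter
                  (fun b => k ≤ PySem.Dict.getD (((PySem.Set.ofList report).map (fun r => PySem.Chars.split₀ r.toList)).foldl
                    pvCntStep PySem.Dict.empty) b 0)))
              (String.mk (pvTgt r)) && (String.mk (pvFst r) == x)) : Nat) : Int)) := by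
  have hDmem : ∀ r ∈ PySem.Set.ofList report, r ∈ report :=
    fun r h => (PySem.Set.mem_ofList report r).mp h
  have hrep2 : ∀ r ∈ PySem.Set.ofList report, (PySem.Chars.split₀ r.toList).length = 2 :=
    fun r h => (hpre r (hDmem r h)).1
  have hrepF : ∀ r ∈ PySem.Set.ofList report,
      k ≤ ((pvCnt report (pvTgt r) : Nat) : Int) → String.mk (pvFst r) ∈ id_list :=
    fun r h => (hpre r (hDmem r h)).2.2
  have hmailB := pv_mailFoldB
    (PySem.Set.ofList
        ((PySem.Dict.keys (((PySem.Set.ofList report).map (fun r => PySem.Chars.split₀ r.toList)).foldl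
            pvCntStep PySem.Dict.empty)).filter
          (fun b => k ≤ PySem.Dict.getD (((PySem.Set.ofList report).map (fun r => PySem.Chars.split₀ r.toList)).foldl
            pvCntStep PySem.Dict.empty) b 0)))
    (PySem.Set.ofList report)
    (id_list.foldl (fun d id => PySem.Dict.insert d id (0 : Int)) PySem.Dict.empty)
    hrep2
    (by
      intro r hrD hc
      rw [pv_banned_eq report k hrep2 r hrD] at hc
      have hkc : k ≤ ((pvCnt report (pvTgt r) : Nat) : Int) := by
        unfold pvCnt
        exact of_decide_eq_true hc
      rw [pv_contains_constFold]
      simp [hrepF r hrD hkc])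
  simp only [solution_alt, PySem.List.dedup_eq_ofList]
  apply List.map_congr_left
  intro x _
  refine (hmailB.2 x).trans ?_
  rw [pv_getD_constFold]
  simp

-- set(xs) is strictly shorter than xs when xs has a duplicate
theorem pv_length_ofList_lt {α : Type} [BEq α] [LawfulBEq α] (l : List α) (h : ¬ l.Nodup) :
    (PySem.Set.ofList l).length < l.length := by
  induction l using List.reverseRecOn with
  | nil => exact absurd List.nodup_nil h
  | append_singleton l x ih =>
    rw [PySem.Set.ofList_append_singleton]
    by_cases hx : x ∈ l
    · have : PySem.Set.add (PySem.Set.ofList l) x = PySem.Set.ofList l := by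
        simp [PySem.Set.add, hx]
      rw [this, List.length_append]
      have := PySem.Set.length_ofList_le l
      simp only [List.length_cons]
      omega
    · have hadd : PySem.Set.add (PySem.Set.ofList l) x = PySem.Set.ofList l ++ [x] := by
        simp [PySem.Set.add, hx]
      have hnl : ¬ l.Nodup := by
        intro hnd
        refine h ((List.nodup_append).mpr ⟨hnd, List.nodup_singleton x, ?_⟩)
        intro a ha b hb hab
        simp only [List.mem_singleton] at hb
        exact hx ((hab.trans hb) ▸ ha)
      rw [hadd, List.length_append, List.length_append]
      have := ih hnl
      simp only [List.length_cons]
      omega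

-- the assembled equivalence outside D_
theorem solution_spec : Claim_unchanged_solution := by
  intro id_list report k _ hpre
  unfold Spec_solution
  intro hnotD
  have hnd : id_list.Nodup := not_not.mp hnotD
  have hDmem : ∀ r ∈ PySem.Set.ofList report, r ∈ report :=
    fun r h => (PySem.Set.mem_ofList report r).mp h
  have hrep2 : ∀ r ∈ PySem.Set.ofList report, (PySem.Chars.split₀ r.toList).length = 2 :=
    fun r h => (hpre r (hDmem r h)).1
  have hrepT : ∀ r ∈ PySem.Set.ofList report, String.mk (pvTgt r) ∈ id_list :=
    fun r h => (hpre r (hDmem r h)).2.1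
  have hlen : ∀ id : String,
      (((PySem.Set.ofList report).filter (fun r => pvTgt r == id.toList)).map pvFst).length
        = (PySem.Set.ofList report).countP (fun r => pvTgt r == id.toList) := by
    intro id; rw [List.length_map, ← List.countP_eq_length_filter]
  rw [pv_A_eq id_list report k hpre, pv_B_eq id_list report k hpre,
    PySem.Set.ofList_eq_self_of_nodup id_list hnd]
  apply List.map_congr_left
  intro x _
  -- step 1: absorb the threshold test into the counted predicate
  have hstep1 : ∀ id ∈ id_list,
      (if k ≤ (((((PySem.Set.ofList report).filter (fun r => pvTgt r == id.toList)).map pvFst).length : Nat) : Int)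
       then ((((((PySem.Set.ofList report).filter (fun r => pvTgt r == id.toList)).map pvFst).map String.mk).count x : Nat) : Int)
       else 0)
      = (((PySem.Set.ofList report).countP (fun r => (pvTgt r == id.toList) &&
          (decide (k ≤ (((PySem.Set.ofList report).countP (fun r' => pvTgt r' == pvTgt r) : Nat) : Int))
            && (String.mk (pvFst r) == x))) : Nat) : Int) := by
    intro id _
    by_cases hk : k ≤ (((((PySem.Set.ofList report).filter (fun r => pvTgt r == id.toList)).map pvFst).length : Nat) : Int)
    · rw [if_pos hk, pv_countA]
      refine congrArg _ (List.countP_congr ?_)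
      intro r _
      by_cases ht : pvTgt r = id.toList
      · have hk2 : k ≤ (((PySem.Set.ofList report).countP (fun r' => pvTgt r' == id.toList) : Nat) : Int) := by
          rw [← hlen id]; exact hk
        simp [ht, hk2]
      · simp [ht]
    · rw [if_neg hk]
      have : ((PySem.Set.ofList report).countP (fun r => (pvTgt r == id.toList) &&
          (decide (k ≤ (((PySem.Set.ofList report).countP (fun r' => pvTgt r' == pvTgt r) : Nat) : Int))
            && (String.mk (pvFst r) == x)))) = 0 := by
        rw [List.countP_eq_zero]
        intro r _ hcontra
        rw [Bool.and_eq_true, Bool.and_eq_true] at hcontra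
        obtain ⟨ht, hdec, _⟩ := hcontra
        have ht' : pvTgt r = id.toList := by simpa using ht
        have := of_decide_eq_true hdec
        rw [ht', ← hlen id] at this
        exact hk this
      simp [this]
  rw [List.map_congr_left hstep1,
    pv_regroup id_list (PySem.Set.ofList report) _ hnd (fun r hr _ => hrepT r hr)]
  exact congrArg _ (List.countP_congr (fun r hr => by rw [pv_banned_eq report k hrep2 r hr]))

theorem solution_changed : Claim_changed_solution := by
  unfold Claim_changed_solution; decide

theorem solution_tight : Claim_exact_solution := by
  intro id_list report k _ hpre hD
  intro heq
  have hlenA : (solution id_list report k).length = (PySem.Set.ofList id_list).length := by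
    rw [pv_A_eq id_list report k hpre, List.length_map]
  have hlenB : (solution_alt id_list report k).length = id_list.length := by
    rw [pv_B_eq id_list report k hpre, List.length_map]
  have hlt := pv_length_ofList_lt id_list hD
  have := congrArg List.length heq
  omega
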